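-- pv_equiv track=rewrite | github.com/tomginsberg/drone-tree-id | deepent/data_processing/register_datasets.py | fix_polygon_tail
-- ===== SOURCE A (Python) =====
-- def fix_polygon_tail(polygon):
--     first = polygon[0]
--     new_poly = []
--     for i, p in enumerate(polygon):
--         new_poly.append(p)
--         if i > 0 and p == first:
--             break
--     return new_poly
-- ===== SOURCE B (Python) =====
-- def fix_polygon_tail(polygon):
--     first = polygon[0]
--     rest = list(polygon[1:])
--     if first in rest:
--         return list(polygon[: rest.index(first) + 2])
--     return list(polygon)
-- ===== Notes on version B (the rewrite author's own statement) =====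
-- stated objective: simpler
-- what changed: B searches the tail with list.index for the first return to the start point and returns one slice, instead of A's element-by-element append loop with an early break.
import Mathlib
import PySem

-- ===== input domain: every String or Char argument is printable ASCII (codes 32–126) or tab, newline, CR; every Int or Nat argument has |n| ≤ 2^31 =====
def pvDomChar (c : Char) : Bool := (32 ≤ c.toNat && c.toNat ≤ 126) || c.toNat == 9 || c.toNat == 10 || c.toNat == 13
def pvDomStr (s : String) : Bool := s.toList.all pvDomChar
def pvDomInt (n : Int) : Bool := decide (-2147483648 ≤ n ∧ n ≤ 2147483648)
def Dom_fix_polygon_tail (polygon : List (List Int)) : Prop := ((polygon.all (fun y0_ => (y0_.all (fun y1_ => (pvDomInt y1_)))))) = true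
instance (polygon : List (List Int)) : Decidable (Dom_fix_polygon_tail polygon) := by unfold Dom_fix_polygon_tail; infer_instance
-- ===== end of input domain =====

-- B searches the tail with list.index for the first return to the start point and returns one
-- slice, instead of A's element-by-element append loop with an early break; equivalence is
-- proved on non-empty input (A raises IndexError on []).

-- ===== PORT A =====
-- A's for-loop over enumerate(polygon): append p, break once i > 0 and p == first.
def fixLoopA (first : List Int) (i : Nat) : List (List Int) → List (List Int)
  | [] => []
  | p :: rest => p :: (if 0 < i ∧ p = first then [] else fixLoopA first (i + 1) rest)

def fix_polygon_tail (polygon : List (List Int)) : List (List Int) :=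
  match polygon with
  | [] => []            -- unreachable under Pre_: polygon[0] raises IndexError in Python
  | first :: _ => fixLoopA first 0 polygon

-- ===== PORT B =====
-- B: rest = polygon[1:]; if first in rest, slice up to rest.index(first) + 2, else the whole list.
def fix_polygon_tail_alt (polygon : List (List Int)) : List (List Int) :=
  match polygon with
  | [] => []            -- unreachable under Pre_: polygon[0] raises IndexError in Python
  | first :: rest =>
    match PySem.List.index? rest first with
    | some idx => PySem.List.slice (first :: rest) none (some ((idx : Int) + 2))
    | none => first :: rest

-- ===== PRECONDITION & SPEC =====
-- Pre_ excludes only the empty list, on which Python A raises IndexError at polygon[0].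
def Pre_fix_polygon_tail (polygon : List (List Int)) : Prop := polygon ≠ []
instance (polygon : List (List Int)) : Decidable (Pre_fix_polygon_tail polygon) := by unfold Pre_fix_polygon_tail; infer_instance
def pvWitness_fix_polygon_tail : List (List Int) := [[0, 0], [1, 0], [1, 1], [0, 0], [5, 5]]
def Spec_fix_polygon_tail (polygon : List (List Int)) (out : List (List Int)) : Prop := out = fix_polygon_tail_alt polygon
instance (polygon : List (List Int)) (out : List (List Int)) : Decidable (Spec_fix_polygon_tail polygon out) := by unfold Spec_fix_polygon_tail; infer_instance

-- ===== CLAIM (what is proved, stated in full; the proofs are below) =====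
def Claim_equal_fix_polygon_tail : Prop := ∀ (polygon : List (List Int)), Dom_fix_polygon_tail polygon → Pre_fix_polygon_tail polygon → Spec_fix_polygon_tail polygon (fix_polygon_tail polygon)

-- ===== LEMMAS AND PROOFS =====

-- A's loop for i ≥ 1 (the condition reduces to p = first) equals "take through the first
-- occurrence of first, or everything if absent".
theorem loop_eq_index (first : List Int) : ∀ (rest : List (List Int)) (i : Nat), 1 ≤ i →
    fixLoopA first i rest =
      (match PySem.List.index? rest first with
       | some idx => rest.take (idx + 1)
       | none => rest) := by
  intro rest
  induction rest with
  | nil => intro i _; simp [fixLoopA, PySem.List.index?, List.idxOf?]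
  | cons p r ih =>
    intro i hi
    by_cases hp : p = first
    · subst hp
      rw [PySem.List.index?_cons_self]
      simp [fixLoopA, Nat.lt_of_lt_of_le Nat.zero_lt_one hi]
    · have hcond : ¬ (0 < i ∧ p = first) := by tauto
      rw [PySem.List.index?_cons_of_ne r hp]
      simp only [fixLoopA, if_neg hcond]
      rw [ih (i + 1) (by omega)]
      cases hfc : PySem.List.index? r first with
      | none => simp
      | some idx => simp

-- ===== VERDICT (by name: the statement is the Claim_ definition above) =====
theorem fix_polygon_tail_spec : Claim_equal_fix_polygon_tail := by
  intro polygon _ hpre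
  unfold Spec_fix_polygon_tail
  match polygon with
  | [] => exact absurd rfl hpre
  | first :: rest =>
    simp only [fix_polygon_tail, fix_polygon_tail_alt, fixLoopA]
    simp only [Nat.lt_irrefl, false_and, if_false]
    rw [loop_eq_index first rest 1 (le_refl 1)]
    cases hfc : PySem.List.index? rest first with
    | none => simp
    | some idx =>
      have hcast : ((idx : Int) + 2) = ((idx + 2 : Nat) : Int) := by push_cast; ring
      simp only [hcast, PySem.List.slice_to_natCast]
      rfl
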